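-- pv_equiv track=rewrite | github.com/kptunterhose/convertToBlenderPython | final_ircToBlender.py | getStartLines
-- ===== SOURCE A (Python) =====
-- def getStartLines(lines):
--     startPoints = []
--     inputOrientation = []
--     inputOrientation4Point = {}
--     for i in range(len(lines)):
--         if 'Point Number' in lines[i]:
--             startPoints.append(i)
--         elif 'Input orientation:' in lines[i]:
--             inputOrientation.append(i)
--     for p in startPoints:
--         maxinputPoint = 0
--         for inputO in inputOrientation:
--             if (inputO < p and inputO > maxinputPoint):
--                 maxinputPoint = inputO
--         inputOrientation4Point[p] = maxinputPoint
--     return startPoints, inputOrientation4Point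
-- ===== SOURCE B (Python) =====
-- def getStartLines(lines):
--     # One pass: remember the most recent 'Input orientation:' index seen so far.
--     startPoints = []
--     inputOrientation4Point = {}
--     last = 0
--     for i, line in enumerate(lines):
--         if 'Point Number' in line:
--             startPoints.append(i)
--             inputOrientation4Point[i] = last
--         elif 'Input orientation:' in line:
--             last = i
--     return startPoints, inputOrientation4Point
-- ===== Notes on version B (the rewrite author's own statement) =====
-- stated objective: simpler
-- what changed: Replaces A's second pass (a nested scan over all orientation indices per start point) by a single forward pass that carries the most recent 'Input orientation:' index and records it the moment a 'Point Number' line is found.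
import Mathlib
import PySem

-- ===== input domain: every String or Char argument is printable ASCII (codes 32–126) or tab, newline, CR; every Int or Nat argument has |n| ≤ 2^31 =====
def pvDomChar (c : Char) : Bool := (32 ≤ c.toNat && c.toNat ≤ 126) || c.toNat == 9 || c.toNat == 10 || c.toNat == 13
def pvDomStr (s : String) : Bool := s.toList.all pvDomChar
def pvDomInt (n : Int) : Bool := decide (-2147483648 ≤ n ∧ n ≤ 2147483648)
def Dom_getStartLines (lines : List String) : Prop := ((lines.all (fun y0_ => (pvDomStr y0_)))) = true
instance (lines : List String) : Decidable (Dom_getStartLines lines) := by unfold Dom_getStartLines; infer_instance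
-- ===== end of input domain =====

-- B replaces A's per-start-point scan of all orientation indices by one forward pass
-- carrying the most recent orientation index (objective: simpler).

-- ===== PORT A =====
def getStartLines (lines : List String) : List Int × (List (Int × Int)) :=
  let scan := (PySem.List.pyRange 0 (PySem.List.len lines) 1).foldl
    (fun (st : List Int × List Int) i =>
      if PySem.Str.isIn "Point Number" (PySem.List.pyGetD lines i "") then (st.1 ++ [i], st.2)
      else if PySem.Str.isIn "Input orientation:" (PySem.List.pyGetD lines i "") then (st.1, st.2 ++ [i])
      else st) ([], [])
  let startPoints := scan.1
  let inputOrientation := scan.2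
  let d := startPoints.foldl
    (fun (d : PySem.Dict Int Int) p =>
      let m := inputOrientation.foldl (fun m io => if io < p ∧ m < io then io else m) 0
      d.insert p m) PySem.Dict.empty
  (startPoints, d.items)

-- ===== PORT B =====
def getStartLines_alt (lines : List String) : List Int × (List (Int × Int)) :=
  let st := (PySem.List.enumerate lines 0).foldl
    (fun (st : List Int × PySem.Dict Int Int × Int) (il : Int × String) =>
      if PySem.Str.isIn "Point Number" il.2 then (st.1 ++ [il.1], st.2.1.insert il.1 st.2.2, st.2.2)
      else if PySem.Str.isIn "Input orientation:" il.2 then (st.1, st.2.1, il.1)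
      else st) ([], PySem.Dict.empty, 0)
  (st.1, st.2.1.items)

-- ===== PRECONDITION & SPEC =====
def Spec_getStartLines (lines : List String) (out : List Int × (List (Int × Int))) : Prop := out = getStartLines_alt lines
instance (lines : List String) (out : List Int × (List (Int × Int))) : Decidable (Spec_getStartLines lines out) := by unfold Spec_getStartLines; infer_instance

-- ===== CLAIM (what is proved, stated in full; the proofs are below) =====
def Claim_equal_getStartLines : Prop := ∀ (lines : List String), Dom_getStartLines lines → Spec_getStartLines lines (getStartLines lines)

-- ===== LEMMAS AND PROOFS =====

-- index lists of the two kinds of lines, starting at index s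
def pvSpF (l : List String) (s : Int) : List Int :=
  match l with
  | [] => []
  | x :: r => if PySem.Str.isIn "Point Number" x then s :: pvSpF r (s+1) else pvSpF r (s+1)

def pvIoF (l : List String) (s : Int) : List Int :=
  match l with
  | [] => []
  | x :: r =>
    if PySem.Str.isIn "Point Number" x then pvIoF r (s+1)
    else if PySem.Str.isIn "Input orientation:" x then s :: pvIoF r (s+1)
    else pvIoF r (s+1)

-- B's pairs: (start point, most recent orientation index)
def pvPrF (l : List String) (s last : Int) : List (Int × Int) :=
  match l with
  | [] => []
  | x :: r =>
    if PySem.Str.isIn "Point Number" x then (s, last) :: pvPrF r (s+1) last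
    else if PySem.Str.isIn "Input orientation:" x then pvPrF r (s+1) s
    else pvPrF r (s+1) last

-- A's inner max-scan
def pvMB (p m : Int) (xs : List Int) : Int :=
  xs.foldl (fun m io => if io < p ∧ m < io then io else m) m

theorem pvMB_const (p m : Int) (xs : List Int) (h : ∀ x ∈ xs, ¬ x < p) : pvMB p m xs = m := by
  induction xs with
  | nil => rfl
  | cons x r ih =>
    simp only [pvMB, List.foldl_cons]
    rw [if_neg (by intro hc; exact h x (by simp) hc.1)]
    exact ih (fun y hy => h y (by simp [hy]))

theorem pvSpF_mem (l : List String) (s : Int) (x : Int) (hx : x ∈ pvSpF l s) : s ≤ x := by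
  induction l generalizing s with
  | nil => simp [pvSpF] at hx
  | cons a r ih =>
    simp only [pvSpF] at hx
    split at hx
    · rcases List.mem_cons.1 hx with h | h
      · omega
      · have := ih (s+1) h; omega
    · have := ih (s+1) hx; omega

theorem pvIoF_mem (l : List String) (s : Int) (x : Int) (hx : x ∈ pvIoF l s) : s ≤ x := by
  induction l generalizing s with
  | nil => simp [pvIoF] at hx
  | cons a r ih =>
    simp only [pvIoF] at hx
    split at hx
    · have := ih (s+1) hx; omega
    · split at hx
      · rcases List.mem_cons.1 hx with h | h
        · omega
        · have := ih (s+1) h; omega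
      · have := ih (s+1) hx; omega

theorem pvSpF_pairwise (l : List String) (s : Int) : (pvSpF l s).Pairwise (· < ·) := by
  induction l generalizing s with
  | nil => simp [pvSpF]
  | cons a r ih =>
    simp only [pvSpF]
    split
    · exact List.pairwise_cons.2 ⟨fun x hx => by have := pvSpF_mem r (s+1) x hx; omega, ih (s+1)⟩
    · exact ih (s+1)

-- the heart: B's carried 'last' equals A's max-scan
theorem pvMain (l : List String) (s last : Int) (h0 : 0 ≤ last) (hls : last ≤ s) :
    pvPrF l s last = (pvSpF l s).map (fun p => (p, pvMB p last (pvIoF l s))) := by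
  induction l generalizing s last with
  | nil => rfl
  | cons x r ih =>
    simp only [pvPrF, pvSpF, pvIoF]
    by_cases h1 : PySem.Str.isIn "Point Number" x
    · rw [if_pos h1, if_pos h1, if_pos h1, List.map_cons]
      have hm : pvMB s last (pvIoF r (s+1)) = last :=
        pvMB_const s last _ (fun y hy => by have := pvIoF_mem r (s+1) y hy; omega)
      rw [hm, ih (s+1) last h0 (by omega)]
    · rw [if_neg h1, if_neg h1, if_neg h1]
      by_cases h2 : PySem.Str.isIn "Input orientation:" x
      · rw [if_pos h2, if_pos h2, ih (s+1) s (by omega) (by omega)]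
        apply List.map_congr_left
        intro p hp
        have hps : s + 1 ≤ p := pvSpF_mem r (s+1) p hp
        simp only [pvMB, List.foldl_cons]
        rw [show (if s < p ∧ last < s then s else last) = s by
          by_cases hl : last < s
          · rw [if_pos ⟨by omega, hl⟩]
          · rw [if_neg (fun hc => hl hc.2)]; omega]
      · rw [if_neg h2, if_neg h2, ih (s+1) last h0 (by omega)]

-- A's first loop over enumerate
theorem pvAscan (l : List String) (s : Int) (sp0 io0 : List Int) :
    (PySem.List.enumerate l s).foldl
      (fun (st : List Int × List Int) (il : Int × String) =>
        if PySem.Str.isIn "Point Number" il.2 then (st.1 ++ [il.1], st.2)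
        else if PySem.Str.isIn "Input orientation:" il.2 then (st.1, st.2 ++ [il.1])
        else st) (sp0, io0) = (sp0 ++ pvSpF l s, io0 ++ pvIoF l s) := by
  induction l generalizing s sp0 io0 with
  | nil => simp [PySem.List.enumerate_nil, pvSpF, pvIoF]
  | cons x r ih =>
    rw [PySem.List.enumerate_cons, List.foldl_cons]
    simp only [pvSpF, pvIoF]
    by_cases h1 : PySem.Str.isIn "Point Number" x
    · simp only [if_pos h1, ih]; simp
    · simp only [if_neg h1]
      by_cases h2 : PySem.Str.isIn "Input orientation:" x
      · simp only [if_pos h2, ih]; simp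
      · simp only [if_neg h2, ih]

-- B's loop, with all dict keys below the running index
theorem pvBscan (l : List String) (s : Int) (sp0 : List Int) (d : PySem.Dict Int Int)
    (last : Int) (hk : ∀ k ∈ d.keys, k < s) :
    ((PySem.List.enumerate l s).foldl
      (fun (st : List Int × PySem.Dict Int Int × Int) (il : Int × String) =>
        if PySem.Str.isIn "Point Number" il.2 then (st.1 ++ [il.1], st.2.1.insert il.1 st.2.2, st.2.2)
        else if PySem.Str.isIn "Input orientation:" il.2 then (st.1, st.2.1, il.1)
        else st) (sp0, d, last)).1 = sp0 ++ pvSpF l s ∧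
    ((PySem.List.enumerate l s).foldl
      (fun (st : List Int × PySem.Dict Int Int × Int) (il : Int × String) =>
        if PySem.Str.isIn "Point Number" il.2 then (st.1 ++ [il.1], st.2.1.insert il.1 st.2.2, st.2.2)
        else if PySem.Str.isIn "Input orientation:" il.2 then (st.1, st.2.1, il.1)
        else st) (sp0, d, last)).2.1.items = d.items ++ pvPrF l s last := by
  induction l generalizing s sp0 d last with
  | nil => simp [PySem.List.enumerate_nil, pvSpF, pvPrF]
  | cons x r ih =>
    simp only [PySem.List.enumerate_cons, List.foldl_cons]
    simp only [pvSpF, pvPrF]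
    by_cases h1 : PySem.Str.isIn "Point Number" x
    · simp only [if_pos h1]
      have hcon : d.contains s = false := by
        rw [PySem.Dict.contains_eq_decide_mem_keys]
        simp only [decide_eq_false_iff_not]
        intro hmem; exact absurd (hk s hmem) (by omega)
      have hkeys : ∀ k ∈ (d.insert s last).keys, k < s + 1 := by
        intro k hkm
        rcases (PySem.Dict.mem_keys_insert _ _ _ _).1 hkm with h | h
        · omega
        · have := hk k h; omega
      obtain ⟨hA, hB⟩ := ih (s+1) (sp0 ++ [s]) (d.insert s last) last hkeys
      refine ⟨by rw [hA]; simp, ?_⟩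
      rw [hB, PySem.Dict.items_insert_of_not_contains _ _ hcon]
      simp
    · simp only [if_neg h1]
      by_cases h2 : PySem.Str.isIn "Input orientation:" x
      · simp only [if_pos h2]; exact ih (s+1) sp0 d s (fun k hkm => by have := hk k hkm; omega)
      · simp only [if_neg h2]; exact ih (s+1) sp0 d last (fun k hkm => by have := hk k hkm; omega)

-- A's result in closed form
theorem pvA_eq (lines : List String) :
    getStartLines lines =
      (pvSpF lines 0, (pvSpF lines 0).map (fun p => (p, pvMB p 0 (pvIoF lines 0)))) := by
  unfold getStartLines
  have hfold :
      (PySem.List.pyRange 0 (PySem.List.len lines) 1).foldl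
        (fun (st : List Int × List Int) i =>
          if PySem.Str.isIn "Point Number" (PySem.List.pyGetD lines i "") then (st.1 ++ [i], st.2)
          else if PySem.Str.isIn "Input orientation:" (PySem.List.pyGetD lines i "") then (st.1, st.2 ++ [i])
          else st) ([], []) = ([] ++ pvSpF lines 0, [] ++ pvIoF lines 0) := by
    rw [← pvAscan lines 0 [] [], PySem.List.enumerate_eq_map_pyRange lines "", List.foldl_map]
  rw [hfold]
  simp only [List.nil_append]
  have hitems := PySem.Dict.items_foldl_insert_fresh (d := (PySem.Dict.empty : PySem.Dict Int Int))
      (l := pvSpF lines 0) (k := fun p => p)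
      (v := fun p => pvMB p 0 (pvIoF lines 0))
      (by intro a _; exact PySem.Dict.contains_empty a)
      (by simpa using (pvSpF_pairwise lines 0).nodup)
  simp only [pvMB] at hitems ⊢
  have hemp : (PySem.Dict.empty : PySem.Dict Int Int).items = [] := rfl
  rw [hitems, hemp, List.nil_append]

theorem pvB_eq (lines : List String) :
    getStartLines_alt lines = (pvSpF lines 0, pvPrF lines 0 0) := by
  unfold getStartLines_alt
  obtain ⟨hA, hB⟩ := pvBscan lines 0 [] PySem.Dict.empty 0
    (by intro k hkm; simp [PySem.Dict.keys_empty] at hkm)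
  have hemp : (PySem.Dict.empty : PySem.Dict Int Int).items = [] := rfl
  simp only [hA, hB, hemp, List.nil_append]

-- ===== VERDICT (by name: the statement is the Claim_ definition above) =====
theorem getStartLines_spec : Claim_equal_getStartLines := by
  intro lines _
  unfold Spec_getStartLines
  rw [pvA_eq, pvB_eq, pvMain lines 0 0 le_rfl le_rfl]
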